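-- pv_equiv track=rewrite | github.com/JangoBoogaloo/LeetCodeExcercise | leetcodePython/Stack/stack_581.py | _getMaximumUnsortedRightIndex
-- ===== SOURCE A (Python) =====
-- from typing import List
--
-- def _getMaximumUnsortedRightIndex(nums: List[int]) -> int:
--     decreaseNumIndexStack = []
--     right = 0
--     for i in range(len(nums)-1, -1, -1):
--         while decreaseNumIndexStack and nums[i] > nums[decreaseNumIndexStack[-1]]:
--             right = max(right, decreaseNumIndexStack.pop())
--         decreaseNumIndexStack.append(i)
--     return right
-- ===== SOURCE B (Python) =====
-- from typing import List
--
-- def _getMaximumUnsortedRightIndex(nums: List[int]) -> int: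
--     if not nums:
--         return 0
--     maxSoFar = nums[0]
--     right = 0
--     for i in range(1, len(nums)):
--         if nums[i] < maxSoFar:
--             right = i
--         else:
--             maxSoFar = nums[i]
--     return right
-- ===== Notes on version B (the rewrite author's own statement) =====
-- stated objective: simpler
-- what changed: Replaces the backward scan with a monotonic index stack (inner pop loop, O(n) extra space) by a single forward pass keeping only a running maximum and the last index that falls below it.
import Mathlib
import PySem

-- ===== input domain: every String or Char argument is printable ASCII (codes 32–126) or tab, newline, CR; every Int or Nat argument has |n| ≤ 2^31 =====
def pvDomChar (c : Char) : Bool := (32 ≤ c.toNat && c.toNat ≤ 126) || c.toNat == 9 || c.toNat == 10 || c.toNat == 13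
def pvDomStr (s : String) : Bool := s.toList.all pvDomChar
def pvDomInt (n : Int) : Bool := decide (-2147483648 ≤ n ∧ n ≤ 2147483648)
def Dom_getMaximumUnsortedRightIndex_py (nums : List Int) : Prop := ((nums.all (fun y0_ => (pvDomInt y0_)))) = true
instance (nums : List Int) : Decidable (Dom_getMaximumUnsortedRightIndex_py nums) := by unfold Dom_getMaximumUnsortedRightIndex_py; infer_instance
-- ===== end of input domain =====

-- B replaces A's backward scan with a monotonic index stack by a single forward pass
-- keeping only a running maximum and the last index that falls below it (simpler, O(1) extra space).

-- ===== PORT A =====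
-- the inner `while` loop: pop while nums[i] > nums[stack top], right = max(right, popped)
def pvPopLoop (nums : List Int) (x : Int) : List Nat → Int → List Nat × Int
  | [], right => ([], right)
  | t :: rest, right =>
      if x > nums.getD t 0 then pvPopLoop nums x rest (max right (t : Int))
      else (t :: rest, right)

-- the outer `for i in range(len(nums)-1, -1, -1)` loop; step `i+1` processes Python index `i`
-- (indices on the stack are always in range, so `getD _ 0` is exact for Python's `nums[...]`)
def pvALoop (nums : List Int) : Nat → List Nat → Int → Int
  | 0, _, right => right
  | i + 1, stack, right =>
      let pr := pvPopLoop nums (nums.getD i 0) stack right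
      pvALoop nums i (i :: pr.1) pr.2

def getMaximumUnsortedRightIndex_py (nums : List Int) : Int :=
  pvALoop nums nums.length [] 0

-- ===== PORT B =====
-- the `for i in range(1, len(nums))` loop, walking the tail with its index
def pvBLoop : List Int → Nat → Int → Int → Int
  | [], _, _, right => right
  | x :: rest, i, m, right =>
      if x < m then pvBLoop rest (i + 1) m (i : Int)
      else pvBLoop rest (i + 1) x right

def getMaximumUnsortedRightIndex_py_alt : List Int → Int
  | [] => 0
  | x0 :: rest => pvBLoop rest 1 x0 0

-- ===== PRECONDITION & SPEC =====
def Spec_getMaximumUnsortedRightIndex_py (nums : List Int) (out : Int) : Prop := out = getMaximumUnsortedRightIndex_py_alt nums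
instance (nums : List Int) (out : Int) : Decidable (Spec_getMaximumUnsortedRightIndex_py nums out) := by unfold Spec_getMaximumUnsortedRightIndex_py; infer_instance

-- ===== CLAIM (what is proved, stated in full; the proofs are below) =====
def Claim_equal_getMaximumUnsortedRightIndex_py : Prop := ∀ (nums : List Int), Dom_getMaximumUnsortedRightIndex_py nums → Spec_getMaximumUnsortedRightIndex_py nums (getMaximumUnsortedRightIndex_py nums)

-- ===== LEMMAS AND PROOFS =====

-- "index j has a strictly larger element at some position k with lo ≤ k < j"
def pvBad (nums : List Int) (lo j : Nat) : Bool :=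
  decide (∃ k, k < j ∧ lo ≤ k ∧ nums.getD j 0 < nums.getD k 0)

-- "index j dominates every element at positions lo ≤ k < j"
def pvGood (nums : List Int) (lo j : Nat) : Bool :=
  decide (∀ k, k < j → lo ≤ k → nums.getD k 0 ≤ nums.getD j 0)

def pvMaxOf (l : List Nat) : Int := l.foldl (fun (a : Int) (j : Nat) => max a (j : Int)) 0

-- max(0, all bad indices in [lo, n))
def pvM (nums : List Int) (lo : Nat) : Int :=
  pvMaxOf ((List.range' lo (nums.length - lo)).filter (pvBad nums lo))

-- the stack contents after the backward loop has processed indices n-1 … lo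
def pvS (nums : List Int) (lo : Nat) : List Nat :=
  (List.range' lo (nums.length - lo)).filter (pvGood nums lo)

theorem pvFoldMax_shift (l : List Nat) (r s : Int) :
    l.foldl (fun (a : Int) (j : Nat) => max a (j : Int)) (max r s) = max r (l.foldl (fun (a : Int) (j : Nat) => max a (j : Int)) s) := by
  induction l generalizing s with
  | nil => simp
  | cons a l ih => simp only [List.foldl_cons, max_assoc]; exact ih (max s a)

theorem pvMaxOf_cons (a : Nat) (l : List Nat) : pvMaxOf (a :: l) = max (a : Int) (pvMaxOf l) := by
  simp only [pvMaxOf, List.foldl_cons]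
  rw [show max (0 : Int) (a : Int) = max (a : Int) 0 from max_comm _ _, pvFoldMax_shift]

theorem pvMaxOf_nonneg (l : List Nat) : 0 ≤ pvMaxOf l := by
  induction l with
  | nil => simp [pvMaxOf]
  | cons a l ih => rw [pvMaxOf_cons]; exact le_trans ih (le_max_right _ _)

theorem pvFoldMax_eq (l : List Nat) (r : Int) (hr : 0 ≤ r) :
    l.foldl (fun (a : Int) (j : Nat) => max a (j : Int)) r = max r (pvMaxOf l) := by
  have h : max r (0 : Int) = r := max_eq_left hr
  rw [pvMaxOf, ← pvFoldMax_shift, h]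

theorem pvMaxOf_le (l : List Nat) (c : Int) (hc : 0 ≤ c) (h : ∀ j ∈ l, (j : Int) ≤ c) :
    pvMaxOf l ≤ c := by
  induction l with
  | nil => simpa [pvMaxOf]
  | cons a l ih =>
      rw [pvMaxOf_cons]
      exact max_le (h a List.mem_cons_self) (ih fun j hj => h j (List.mem_cons_of_mem _ hj))

theorem pvDropWhile_eq_filter {α : Type} (p : α → Bool) (l : List α)
    (h : l.Pairwise (fun a b => p b = true → p a = true)) :
    l.dropWhile p = l.filter (fun x => !p x) := by
  induction l with
  | nil => rfl
  | cons a l ih =>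
      rcases List.pairwise_cons.mp h with ⟨ha, hl⟩
      by_cases hp : p a = true
      · simp [hp, ih hl]
      · have hp' : p a = false := Bool.eq_false_iff.mpr hp
        have hall : l.filter (fun x => !p x) = l :=
          List.filter_eq_self.mpr fun x hx => by
            simp [Bool.eq_false_iff.mpr fun hpx => hp (ha x hx hpx)]
        simp [hp', hall]

theorem pvTakeWhile_eq_filter {α : Type} (p : α → Bool) (l : List α)
    (h : l.Pairwise (fun a b => p b = true → p a = true)) :
    l.takeWhile p = l.filter p := by
  induction l with
  | nil => rfl
  | cons a l ih =>
      rcases List.pairwise_cons.mp h with ⟨ha, hl⟩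
      by_cases hp : p a = true
      · simp [hp, ih hl]
      · have hp' : p a = false := Bool.eq_false_iff.mpr hp
        have hall : l.filter p = [] :=
          List.filter_eq_nil_iff.mpr fun x hx hpx => hp (ha x hx hpx)
        simp [hp', hall]

theorem pvPopLoop_eq (nums : List Int) (x : Int) (l : List Nat) (r : Int) :
    pvPopLoop nums x l r =
      (l.dropWhile (fun t => decide (nums.getD t 0 < x)),
       (l.takeWhile (fun t => decide (nums.getD t 0 < x))).foldl (fun (a : Int) (t : Nat) => max a (t : Int)) r) := by
  induction l generalizing r with
  | nil => rfl
  | cons t rest ih =>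
      simp only [pvPopLoop, List.dropWhile_cons, List.takeWhile_cons, decide_eq_true_eq,
        gt_iff_lt]
      split_ifs with hp
      · rw [ih]; simp
      · simp

-- elements of the stack pvS are value-monotone: later (deeper) entries are ≥ earlier ones
theorem pvS_pairwise (nums : List Int) (lo : Nat) :
    (pvS nums lo).Pairwise (fun a b => nums.getD a 0 ≤ nums.getD b 0) := by
  have hlt : (pvS nums lo).Pairwise (fun a b => a < b) :=
    (List.pairwise_lt_range').filter _
  refine hlt.imp_of_mem ?_
  intro a b hamem hbmem hab
  have hga : pvGood nums lo b = true := List.of_mem_filter hbmem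
  have hla : lo ≤ a := by
    have := List.mem_filter.mp hamem
    exact (List.mem_range'_1.mp this.1).1
  exact (of_decide_eq_true hga) a hab hla

theorem pvS_pop_pairwise (nums : List Int) (lo : Nat) (x : Int) :
    (pvS nums lo).Pairwise (fun a b =>
      decide (nums.getD b 0 < x) = true → decide (nums.getD a 0 < x) = true) := by
  refine (pvS_pairwise nums lo).imp ?_
  intro a b hab hb
  exact decide_eq_true (lt_of_le_of_lt hab (of_decide_eq_true hb))

theorem pvGood_step (nums : List Int) (i j : Nat) (hij : i + 1 ≤ j) :
    pvGood nums i j = (pvGood nums (i + 1) j && decide (nums.getD i 0 ≤ nums.getD j 0)) := by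
  simp only [pvGood, ← Bool.decide_and, decide_eq_decide]
  constructor
  · intro h
    exact ⟨fun k hk hik => h k hk (Nat.le_of_succ_le hik), h i hij (le_refl i)⟩
  · rintro ⟨h1, h2⟩ k hk hik
    rcases Nat.eq_or_lt_of_le hik with he | hl
    · exact he ▸ h2
    · exact h1 k hk hl

theorem pvBad_step (nums : List Int) (i j : Nat) (hij : i + 1 ≤ j) :
    pvBad nums i j = (pvBad nums (i + 1) j || decide (nums.getD j 0 < nums.getD i 0)) := by
  simp only [pvBad, ← Bool.decide_or, decide_eq_decide]
  constructor
  · rintro ⟨k, hk, hik, hv⟩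
    rcases Nat.eq_or_lt_of_le hik with he | hl
    · exact Or.inr (he ▸ hv)
    · exact Or.inl ⟨k, hk, hl, hv⟩
  · rintro (⟨k, hk, hik, hv⟩ | hv)
    · exact ⟨k, hk, Nat.le_of_succ_le hik, hv⟩
    · exact ⟨i, hij, le_refl i, hv⟩

theorem pvNotBad_eq_good (nums : List Int) (lo j : Nat) :
    (!pvBad nums lo j) = pvGood nums lo j := by
  simp only [pvBad, pvGood, decide_not.symm, decide_eq_decide]
  push Not
  constructor
  · intro h k hk hik; exact h k hk hik
  · intro h k hk hik; exact h k hk hik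

theorem pvGood_self (nums : List Int) (i : Nat) : pvGood nums i i = true := by
  simp only [pvGood, decide_eq_true_eq]
  intro k hk hik; omega

theorem pvBad_lo_false (nums : List Int) (i : Nat) : pvBad nums i i = false := by
  have := pvNotBad_eq_good nums i i
  rw [pvGood_self] at this
  simpa using this

theorem pvMaxOf_filter_or (P Q : Nat → Bool) (l : List Nat) :
    pvMaxOf (l.filter (fun j => P j || Q j)) =
      max (pvMaxOf (l.filter P)) (pvMaxOf (l.filter (fun j => !P j && Q j))) := by
  induction l with
  | nil => simp [pvMaxOf]
  | cons a l ih =>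
      by_cases hP : P a = true
      · simp [hP, pvMaxOf_cons, ih, max_assoc]
      · have hP' : P a = false := Bool.eq_false_iff.mpr hP
        by_cases hQ : Q a = true
        · simp only [List.filter_cons, hP', hQ, Bool.false_or, Bool.not_false, Bool.true_and,
            Bool.false_eq_true, if_false, if_true, pvMaxOf_cons, ih]
          rw [max_left_comm]
        · have hQ' : Q a = false := Bool.eq_false_iff.mpr hQ
          simp [hP', hQ', ih]

theorem pvRange'_cons (i n : Nat) (h : i < n) :
    List.range' i (n - i) = i :: List.range' (i + 1) (n - (i + 1)) := by
  have : n - i = (n - (i + 1)) + 1 := by omega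
  rw [this, List.range'_succ]

-- ===== the A-side invariant =====

theorem pvS_step (nums : List Int) (i : Nat) (h : i < nums.length) :
    pvS nums i = i :: ((pvS nums (i + 1)).filter
      (fun j => !decide (nums.getD j 0 < nums.getD i 0))) := by
  unfold pvS
  rw [pvRange'_cons i nums.length h, List.filter_cons, pvGood_self, if_pos rfl,
    List.filter_filter]
  congr 1
  apply List.filter_congr
  intro j hj
  have hij : i + 1 ≤ j := (List.mem_range'_1.mp hj).1
  rw [pvGood_step nums i j hij, Bool.and_comm]
  congr 1
  rw [← decide_not, decide_eq_decide]
  exact not_lt.symm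

theorem pvM_step (nums : List Int) (i : Nat) (h : i < nums.length) :
    pvM nums i =
      ((pvS nums (i + 1)).takeWhile (fun t => decide (nums.getD t 0 < nums.getD i 0))).foldl
        (fun (a : Int) (t : Nat) => max a (t : Int)) (pvM nums (i + 1)) := by
  set p : Nat → Bool := fun t => decide (nums.getD t 0 < nums.getD i 0) with hp
  have hnn : (0 : Int) ≤ pvM nums (i + 1) := by unfold pvM; exact pvMaxOf_nonneg _
  rw [pvTakeWhile_eq_filter p _ (pvS_pop_pairwise nums (i + 1) _),
    pvFoldMax_eq _ _ hnn]
  unfold pvS pvM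
  rw [List.filter_filter, pvRange'_cons i nums.length h, List.filter_cons, pvBad_lo_false,
    if_neg Bool.false_ne_true]
  have hcongr : List.filter (pvBad nums i) (List.range' (i + 1) (nums.length - (i + 1))) =
      List.filter (fun j => pvBad nums (i + 1) j || p j)
        (List.range' (i + 1) (nums.length - (i + 1))) := by
    apply List.filter_congr
    intro j hj
    exact pvBad_step nums i j (List.mem_range'_1.mp hj).1
  rw [hcongr, pvMaxOf_filter_or]
  congr 1
  apply congrArg
  apply List.filter_congr
  intro j hj
  rw [pvNotBad_eq_good, Bool.and_comm]

theorem pvALoop_invariant (nums : List Int) :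
    ∀ i, i ≤ nums.length → pvALoop nums i (pvS nums i) (pvM nums i) = pvM nums 0 := by
  intro i
  induction i with
  | zero => intro _; rfl
  | succ i ih =>
      intro hle
      have hi : i < nums.length := hle
      show pvALoop nums (i + 1) (pvS nums (i + 1)) (pvM nums (i + 1)) = pvM nums 0
      rw [pvALoop, pvPopLoop_eq]
      have hdrop : (pvS nums (i + 1)).dropWhile (fun t => decide (nums.getD t 0 < nums.getD i 0)) =
          (pvS nums (i + 1)).filter (fun j => !decide (nums.getD j 0 < nums.getD i 0)) :=
        pvDropWhile_eq_filter _ _ (pvS_pop_pairwise nums (i + 1) _)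
      simp only [hdrop]
      rw [← pvM_step nums i hi]
      have hS : i :: (pvS nums (i + 1)).filter
          (fun j => !decide (nums.getD j 0 < nums.getD i 0)) = pvS nums i :=
        (pvS_step nums i hi).symm
      rw [hS]
      exact ih (Nat.le_of_succ_le hle)

theorem pvA_eq_M (nums : List Int) : getMaximumUnsortedRightIndex_py nums = pvM nums 0 := by
  have hS : pvS nums nums.length = [] := by
    unfold pvS
    simp
  have hM : pvM nums nums.length = 0 := by
    unfold pvM
    simp [pvMaxOf]
  have := pvALoop_invariant nums nums.length (le_refl _)
  rw [hS, hM] at this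
  exact this

-- ===== the B-side invariant =====

theorem pvBLoop_invariant (nums : List Int) :
    ∀ (suf : List Int) (i : Nat) (m : Int),
      i + suf.length = nums.length →
      suf = nums.drop i →
      (∀ k, k < i → nums.getD k 0 ≤ m) →
      (∃ k, k < i ∧ nums.getD k 0 = m) →
      pvBLoop suf i m (pvMaxOf ((List.range i).filter (pvBad nums 0))) = pvM nums 0 := by
  intro suf
  induction suf with
  | nil =>
      intro i m hlen _ _ _
      simp only [List.length_nil, Nat.add_zero] at hlen
      subst hlen
      unfold pvM
      rw [pvBLoop]
      congr 1
      rw [Nat.sub_zero, ← List.range_eq_range']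
  | cons x suf' ih =>
      intro i m hlen hdrop hub hatt
      have hi : i < nums.length := by
        simp only [List.length_cons] at hlen; omega
      have hx : nums.getD i 0 = x := by
        have h0 : (nums.drop i).getD 0 0 = x := by rw [← hdrop]; rfl
        rwa [List.getD, List.getElem?_drop, Nat.add_zero, ← List.getD] at h0
      have hdrop' : suf' = nums.drop (i + 1) := by
        rw [← List.tail_drop, ← hdrop]
        rfl
      have hlen' : (i + 1) + suf'.length = nums.length := by
        simp only [List.length_cons] at hlen; omega
      have hfilterstep : (List.range (i + 1)).filter (pvBad nums 0) =
          (List.range i).filter (pvBad nums 0) ++ (if pvBad nums 0 i then [i] else []) := by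
        rw [List.range_succ, List.filter_append]
        congr 1
        simp [List.filter_cons]
      by_cases hlt : x < m
      · rw [pvBLoop, if_pos hlt]
        have hbad : pvBad nums 0 i = true := by
          rcases hatt with ⟨k, hk, hkm⟩
          refine decide_eq_true ⟨k, hk, Nat.zero_le k, ?_⟩
          rw [hx, hkm]; exact hlt
        have hval : ((i : Int)) = pvMaxOf ((List.range (i + 1)).filter (pvBad nums 0)) := by
          rw [hfilterstep, hbad, if_pos rfl]
          have hle' : pvMaxOf ((List.range i).filter (pvBad nums 0)) ≤ (i : Int) := by
            apply pvMaxOf_le _ _ (Int.natCast_nonneg i)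
            intro j hj
            have : j < i := List.mem_range.mp (List.mem_filter.mp hj).1
            exact_mod_cast Nat.le_of_lt this
          rw [pvMaxOf, List.foldl_append, List.foldl_cons, List.foldl_nil, ← pvMaxOf]
          exact (max_eq_right hle').symm
        rw [hval]
        refine ih (i + 1) m hlen' hdrop' ?_ ?_
        · intro k hk
          rcases Nat.lt_succ_iff_lt_or_eq.mp hk with h | h
          · exact hub k h
          · subst h; rw [hx]; exact le_of_lt hlt
        · rcases hatt with ⟨k, hk, hkm⟩
          exact ⟨k, Nat.lt_succ_of_lt hk, hkm⟩
      · rw [pvBLoop, if_neg hlt]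
        have hmx : m ≤ x := not_lt.mp hlt
        have hbad : pvBad nums 0 i = false := by
          rw [← Bool.not_eq_true]
          intro hb
          rcases of_decide_eq_true hb with ⟨k, hk, _, hv⟩
          rw [hx] at hv
          exact absurd (lt_of_le_of_lt (le_trans (hub k hk) hmx) hv) (lt_irrefl _)
        have hsame : (List.range (i + 1)).filter (pvBad nums 0) =
            (List.range i).filter (pvBad nums 0) := by
          rw [hfilterstep, hbad]
          simp
        rw [← hsame]
        refine ih (i + 1) x hlen' hdrop' ?_ ?_
        · intro k hk
          rcases Nat.lt_succ_iff_lt_or_eq.mp hk with h | h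
          · exact le_trans (hub k h) hmx
          · subst h; rw [hx]
        · exact ⟨i, Nat.lt_succ_self i, hx⟩

theorem pvB_eq_M (nums : List Int) : getMaximumUnsortedRightIndex_py_alt nums = pvM nums 0 := by
  match nums with
  | [] => rfl
  | x0 :: rest =>
      show pvBLoop rest 1 x0 0 = pvM (x0 :: rest) 0
      have h0 : pvMaxOf ((List.range 1).filter (pvBad (x0 :: rest) 0)) = 0 := by
        have : pvBad (x0 :: rest) 0 0 = false := pvBad_lo_false _ 0
        simp [List.range_succ, this, pvMaxOf]
      rw [← h0]
      refine pvBLoop_invariant (x0 :: rest) rest 1 x0 ?_ rfl ?_ ?_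
      · simp [Nat.add_comm]
      · intro k hk
        interval_cases k
        rfl
      · exact ⟨0, Nat.zero_lt_one, rfl⟩

-- ===== VERDICT (by name: the statement is the Claim_ definition above) =====
theorem getMaximumUnsortedRightIndex_py_spec : Claim_equal_getMaximumUnsortedRightIndex_py := by
  intro nums _
  unfold Spec_getMaximumUnsortedRightIndex_py
  rw [pvA_eq_M, pvB_eq_M]
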